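-- pv_equiv track=rewrite | github.com/sainihimanshu1999/Data-Structures | June2021/Heaps/ColoredBalls.py | coloredBalls
-- ===== SOURCE A (Python) =====
-- def coloredBalls(orders,inventory):
--     inventory = sorted(inventory,reverse=True)
--     inventory += [0]
--     result = 0
--     k = 1
--
--     for i in range(len(inventory)-1):
--         if inventory[i]>inventory[i+1]:
--             if k*(inventory[i]-inventory[i+1])<orders:
--                 difference = inventory[i]-inventory[i+1]
--                 result += k*(inventory[i]+inventory[i+1]+1)*difference//2
--                 orders -= k*difference
--
--             else:
--                 q,r = divmod(orders,k)
--                 result += k*(inventory[i]+(inventory[i]-q+1))*q//2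
--                 result += r*(inventory[i]-q)
--                 return result%(10**9+7)
--
--         k+=1
-- ===== SOURCE B (Python) =====
-- def coloredBalls(orders, inventory):
--     # Stage 1: tabulate. Count balls per value, list the distinct value levels
--     # top-down (with a 0 floor when all levels are positive), and build one
--     # per-band table with NO early exit and NO mutation of `orders`:
--     # bands[i] = (cur, nxt, width, units_before, revenue_before).
--     counts = {}
--     for v in inventory:
--         counts[v] = counts.get(v, 0) + 1
--     levels = sorted(counts, reverse=True)
--     if levels and levels[-1] > 0:
--         levels.append(0)
--     bands = []
--     w = units = rev = 0
--     for cur, nxt in zip(levels, levels[1:]):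
--         w += counts[cur]
--         bands.append((cur, nxt, w, units, rev))
--         units += w * (cur - nxt)
--         rev += w * (cur + nxt + 1) * (cur - nxt) // 2
--     if not bands or orders > units:
--         return None
--     # Stage 2: binary-search the stopping band — the first band whose
--     # cumulative unit count reaches `orders` (cumulative units are monotone).
--     lo, hi = 0, len(bands) - 1
--     while lo < hi:
--         mid = (lo + hi) // 2
--         cur, nxt, bw, before, _ = bands[mid]
--         if orders <= before + bw * (cur - nxt):
--             hi = mid
--         else:
--             lo = mid + 1
--     # Stage 3: one closed-form evaluation at that band.
--     cur, nxt, bw, before, rev = bands[lo]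
--     q, r = divmod(orders - before, bw)
--     return (rev + bw * (2 * cur - q + 1) * q // 2 + r * (cur - q)) % (10**9 + 7)
-- ===== Notes on version B (the rewrite author's own statement) =====
-- stated objective: alternative
-- what changed: B replaces A's stateful sweep (which decrements orders in place and returns mid-loop) by three separate stages: build per-band prefix tables (width, cumulative units, cumulative revenue) with no early exit, binary-search the stopping band over the monotone cumulative unit counts, and evaluate one closed form at that band.
-- outside the precondition, e.g. on coloredBalls(5, [1, 1]): A returns None, B returns None
import Mathlib
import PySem

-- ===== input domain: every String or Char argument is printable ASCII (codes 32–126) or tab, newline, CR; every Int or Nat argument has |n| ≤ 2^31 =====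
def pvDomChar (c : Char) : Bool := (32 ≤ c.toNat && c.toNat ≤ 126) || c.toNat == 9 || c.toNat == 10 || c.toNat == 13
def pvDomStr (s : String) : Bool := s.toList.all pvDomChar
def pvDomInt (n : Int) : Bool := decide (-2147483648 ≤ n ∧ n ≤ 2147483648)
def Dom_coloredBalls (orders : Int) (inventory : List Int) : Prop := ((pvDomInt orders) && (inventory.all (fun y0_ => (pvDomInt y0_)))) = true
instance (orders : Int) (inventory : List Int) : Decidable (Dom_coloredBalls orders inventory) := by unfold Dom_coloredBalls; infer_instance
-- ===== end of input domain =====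

-- B replaces A's stateful sweep (decrementing orders, returning mid-loop) by prefix
-- band tables + a binary search for the stopping band + one closed-form evaluation
-- (alternative decomposition, same asymptotic cost).


-- ===== PORT A =====
-- A's for-loop over i in range(len-1), reading inventory[i], inventory[i+1]: structural
-- recursion over adjacent pairs of the sorted-descending list, carrying (orders, result, k).
-- Falling off the end is Python's `return None` (no int): the port yields 0 there, excluded by Pre_.
def coloredBallsLoop : List Int → Int → Int → Int → Int
  | x :: y :: rest, orders, result, k =>
      if y < x then
        if k * (x - y) < orders then
          coloredBallsLoop (y :: rest) (orders - k * (x - y))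
            (result + PySem.Int.floordiv (k * (x + y + 1) * (x - y)) 2) (k + 1)
        else
          let q := PySem.Int.floordiv orders k
          let r := PySem.Int.mod orders k
          PySem.Int.mod (result + PySem.Int.floordiv (k * (x + (x - q + 1)) * q) 2 + r * (x - q)) (10 ^ 9 + 7)
      else coloredBallsLoop (y :: rest) orders result (k + 1)
  | _, _, _, _ => 0

def coloredBalls (orders : Int) (inventory : List Int) : Int :=
  coloredBallsLoop (PySem.List.sorted inventory (fun x => x) true ++ [0]) orders 0 1

-- ===== PORT B =====
-- Source B's band record (cur, nxt, width, units_before, revenue_before)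
structure PVBand where
  cur : Int
  nxt : Int
  w : Int
  before : Int
  rev : Int
  deriving DecidableEq, Repr

-- port of Source B's `if levels and levels[-1] > 0: levels.append(0)`
def coloredBallsSentinel (levels : List Int) : List Int :=
  match levels.getLast? with
  | some v => if 0 < v then levels ++ [0] else levels
  | none => levels

-- Source B's table-building loop `for cur, nxt in zip(levels, levels[1:])`, carrying
-- (w, units, rev); returns the band list and the final `units` total
def cbBuild (counts : PySem.Dict Int Int) : List Int → Int → Int → Int → (List PVBand × Int)
  | cur :: nxt :: rest, w, units, rev =>
      let w' := w + counts.getD cur 0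
      let res := cbBuild counts (nxt :: rest) w' (units + w' * (cur - nxt))
        (rev + PySem.Int.floordiv (w' * (cur + nxt + 1) * (cur - nxt)) 2)
      (⟨cur, nxt, w', units, rev⟩ :: res.1, res.2)
  | _, _, units, _ => ([], units)

def pvB0 : PVBand := ⟨0, 0, 0, 0, 0⟩

-- cumulative units through a band: `before + bw * (cur - nxt)`, Source B's search key
def pvCnext (b : PVBand) : Int := b.before + b.w * (b.cur - b.nxt)

-- Source B's `while lo < hi` binary search for the first band whose cumulative units reach orders
def cbSearch (bands : List PVBand) (orders : Int) (lo hi : Nat) : Nat :=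
  if _h : lo < hi then
    if orders ≤ pvCnext (bands.getD ((lo + hi) / 2) pvB0) then cbSearch bands orders lo ((lo + hi) / 2)
    else cbSearch bands orders ((lo + hi) / 2 + 1) hi
  else lo
termination_by hi - lo
decreasing_by all_goals omega

-- the `return None` paths of Source B (no bands / orders exceed the total units) yield 0, excluded by Pre_
def coloredBalls_alt (orders : Int) (inventory : List Int) : Int :=
  let counts := inventory.foldl (fun d v => d.insert v (d.getD v 0 + 1)) PySem.Dict.empty
  let levels := coloredBallsSentinel (PySem.List.sorted counts.keys (fun x => x) true)
  let br := cbBuild counts levels 0 0 0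
  if br.1 = [] ∨ br.2 < orders then 0
  else
    let b := br.1.getD (cbSearch br.1 orders 0 (br.1.length - 1)) pvB0
    let q := PySem.Int.floordiv (orders - b.before) b.w
    let r := PySem.Int.mod (orders - b.before) b.w
    PySem.Int.mod (b.rev + PySem.Int.floordiv (b.w * (2 * b.cur - q + 1) * q) 2 + r * (b.cur - q)) (10 ^ 9 + 7)

-- ===== PRECONDITION & SPEC =====
-- Pre_ excludes exactly the inputs on which A's loop falls through and Python returns None
-- (not an int): it admits the inputs where some level strictly exceeds the next one (capacity
-- C = sum - n*min(0, min) is positive) and orders do not exceed the total capacity C.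
def Pre_coloredBalls (orders : Int) (inventory : List Int) : Prop :=
  0 < inventory.sum - (inventory.length : Int) * (inventory.foldr min 0) ∧
  orders ≤ inventory.sum - (inventory.length : Int) * (inventory.foldr min 0)
instance (orders : Int) (inventory : List Int) : Decidable (Pre_coloredBalls orders inventory) := by unfold Pre_coloredBalls; infer_instance

def pvWitness_coloredBalls : Int × List Int := (3, [2, 2])

def Spec_coloredBalls (orders : Int) (inventory : List Int) (out : Int) : Prop := out = coloredBalls_alt orders inventory
instance (orders : Int) (inventory : List Int) (out : Int) : Decidable (Spec_coloredBalls orders inventory out) := by unfold Spec_coloredBalls; infer_instance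

-- ===== CLAIM (what is proved, stated in full; the proofs are below) =====
def Claim_equal_coloredBalls : Prop := ∀ (orders : Int) (inventory : List Int), Dom_coloredBalls orders inventory → Pre_coloredBalls orders inventory → Spec_coloredBalls orders inventory (coloredBalls orders inventory)

-- ===== LEMMAS AND PROOFS =====

-- A's sweep over the distinct levels (proof-side bridge between the two ports)
def cbSweep (counts : PySem.Dict Int Int) : List Int → Int → Int → Int → Int
  | cur :: nxt :: rest, orders, width, result =>
      let w := width + counts.getD cur 0
      let band := w * (cur - nxt)
      if band < orders then
        cbSweep counts (nxt :: rest) (orders - band) w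
          (result + PySem.Int.floordiv (w * (cur + nxt + 1) * (cur - nxt)) 2)
      else
        let q := PySem.Int.floordiv orders w
        let r := PySem.Int.mod orders w
        PySem.Int.mod (result + (PySem.Int.floordiv (w * (cur + (cur - q + 1)) * q) 2 + r * (cur - q))) (10 ^ 9 + 7)
  | _, _, _, _ => 0

-- the closed form B evaluates at the stopping band
def cbCF (b : PVBand) (orders : Int) : Int :=
  let q := PySem.Int.floordiv (orders - b.before) b.w
  let r := PySem.Int.mod (orders - b.before) b.w
  PySem.Int.mod (b.rev + PySem.Int.floordiv (b.w * (2 * b.cur - q + 1) * q) 2 + r * (b.cur - q)) (10 ^ 9 + 7)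

-- first band whose cumulative units reach orders (linear reference for the binary search)
def cbLin : List PVBand → Int → Option PVBand
  | [], _ => none
  | b :: rest, orders => if orders ≤ pvCnext b then some b else cbLin rest orders

-- the sorted-descending multiset as run-length expansion of its distinct levels
def pvExpand (cnt : Int → Nat) (L : List Int) : List Int :=
  L.flatMap (fun v => List.replicate (cnt v) v)

-- A's loop walks through a run of equal values only incrementing k
theorem pvRunCollapse (c : Nat) (v : Int) (z : List Int) (o res k : Int) :
    coloredBallsLoop (List.replicate (c + 1) v ++ z) o res k
      = coloredBallsLoop (v :: z) o res (k + c) := by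
  induction c generalizing k with
  | zero => simp
  | succ c ih =>
      have h1 : List.replicate (c + 2) v ++ z = v :: v :: (List.replicate c v ++ z) := by
        simp [List.replicate_succ]
      have h2 : (v :: (List.replicate c v ++ z)) = List.replicate (c + 1) v ++ z := by
        simp [List.replicate_succ]
      rw [h1, coloredBallsLoop, if_neg (lt_irrefl v), h2, ih]
      congr 1
      push_cast; ring

theorem pvCountExpand (cnt : Int → Nat) (L : List Int) (hN : L.Nodup) (a : Int) :
    (pvExpand cnt L).count a = if a ∈ L then cnt a else 0 := by
  induction L with
  | nil => simp [pvExpand]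
  | cons v t ih =>
      rcases List.nodup_cons.mp hN with ⟨hv, ht⟩
      have ihp := ih ht
      simp only [pvExpand, List.flatMap_cons, List.count_append, List.count_replicate] at *
      by_cases hav : a = v
      · subst hav
        simp [ihp, hv]
      · simp [ihp, hav, Ne.symm hav]

theorem pvExpandPerm (inv L : List Int) (hN : L.Nodup) (hm : ∀ a, a ∈ L ↔ a ∈ inv) :
    (pvExpand (fun v => inv.count v) L).Perm inv := by
  rw [List.perm_iff_count]
  intro a
  rw [pvCountExpand _ _ hN]
  by_cases h : a ∈ L
  · simp [h]
  · have h2 : a ∉ inv := fun hc => h ((hm a).mpr hc)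
    simp [h, List.count_eq_zero.mpr h2]

theorem pvExpandPairwise (cnt : Int → Nat) (L : List Int) (hP : L.Pairwise (· > ·)) :
    (pvExpand cnt L).Pairwise (fun a b => b ≤ a) := by
  induction L with
  | nil => simp [pvExpand]
  | cons v t ih =>
      rcases List.pairwise_cons.mp hP with ⟨hv, ht⟩
      simp only [pvExpand, List.flatMap_cons]
      rw [List.pairwise_append]
      refine ⟨List.pairwise_replicate.mpr (Or.inr le_rfl), ih ht, ?_⟩
      intro a ha b hb
      obtain ⟨-, rfl⟩ := List.mem_replicate.mp ha
      obtain ⟨u, hu, hb'⟩ := List.mem_flatMap.mp hb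
      obtain ⟨-, rfl⟩ := List.mem_replicate.mp hb'
      exact le_of_lt (hv _ hu)

-- the distinct levels list and its properties
theorem pvLevelsProps (inv : List Int) :
    (PySem.List.sorted (PySem.Set.ofList inv) (fun x => x) true).Pairwise (· > ·) ∧
    (PySem.List.sorted (PySem.Set.ofList inv) (fun x => x) true).Nodup ∧
    (∀ a, a ∈ PySem.List.sorted (PySem.Set.ofList inv) (fun x => x) true ↔ a ∈ inv) := by
  have hperm := PySem.List.sorted_perm (PySem.Set.ofList inv) (fun x => x) true
  have hN : (PySem.List.sorted (PySem.Set.ofList inv) (fun x => x) true).Nodup :=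
    hperm.nodup_iff.mpr (PySem.Set.nodup_ofList inv)
  have hge := PySem.List.sorted_pairwise_rev (PySem.Set.ofList inv) (fun x => x)
  refine ⟨?_, hN, ?_⟩
  · exact (hge.and hN).imp (fun h => lt_of_le_of_ne h.1 (Ne.symm h.2))
  · intro a
    rw [PySem.List.mem_sorted, PySem.Set.mem_ofList]

-- A's sorted-descending list is the run-length expansion of the distinct levels
theorem pvSortedEq (inv : List Int) :
    PySem.List.sorted inv (fun x => x) true
      = pvExpand (fun v => inv.count v) (PySem.List.sorted (PySem.Set.ofList inv) (fun x => x) true) := by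
  obtain ⟨hP, hN, hm⟩ := pvLevelsProps inv
  exact List.Perm.eq_of_pairwise
    (fun a b _ _ h1 h2 => le_antisymm h2 h1)
    (PySem.List.sorted_pairwise_rev inv (fun x => x))
    (pvExpandPairwise _ _ hP)
    ((PySem.List.sorted_perm inv (fun x => x) true).trans (pvExpandPerm inv _ hN hm).symm)

theorem pvSentinelView (v u : Int) (t : List Int) :
    coloredBallsSentinel (v :: u :: t) = v :: coloredBallsSentinel (u :: t) := by
  simp only [coloredBallsSentinel, List.getLast?_cons_cons]
  cases h : (u :: t).getLast? with
  | none => simp at h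
  | some w => simp only []; split_ifs <;> simp

theorem pvSentinelCons (u : Int) (t : List Int) :
    ∃ z, coloredBallsSentinel (u :: t) = u :: z := by
  simp only [coloredBallsSentinel]
  cases h : (u :: t).getLast? with
  | none => simp at h
  | some w => simp only []; split_ifs <;> exact ⟨_, rfl⟩

-- sentinel preserves weak descent
theorem pvLastLe (L : List Int) (v : Int) (hP : L.Pairwise (fun a b => b ≤ a))
    (hlast : L.getLast? = some v) : ∀ a ∈ L, v ≤ a := by
  induction L with
  | nil => simp at hlast
  | cons x t ih =>
      rcases List.pairwise_cons.mp hP with ⟨hx, ht⟩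
      cases t with
      | nil =>
          simp only [List.getLast?_singleton, Option.some.injEq] at hlast
          subst hlast
          intro a ha
          simp only [List.mem_singleton] at ha
          subst ha
          exact le_refl _
      | cons y t' =>
          rw [List.getLast?_cons_cons] at hlast
          intro a ha
          rcases List.mem_cons.mp ha with rfl | hat
          · exact hx v (List.mem_of_getLast? hlast)
          · exact ih ht hlast a hat

theorem pvSentinelPairwise (L : List Int) (hP : L.Pairwise (fun a b => b ≤ a)) :
    (coloredBallsSentinel L).Pairwise (fun a b => b ≤ a) := by
  unfold coloredBallsSentinel
  cases hlast : L.getLast? with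
  | none => simpa
  | some v =>
      simp only []
      split_ifs with hv
      · rw [List.pairwise_append]
        refine ⟨hP, by simp, ?_⟩
        intro a ha b hb
        simp only [List.mem_singleton] at hb
        subst hb
        exact le_of_lt (lt_of_lt_of_le hv (pvLastLe L v hP hlast a ha))
      · exact hP

-- main loop correspondence: A over the expanded runs (plus trailing 0) with k = width+1
-- equals the sweep over the distinct levels (with the conditional sentinel)
theorem pvMain (counts : PySem.Dict Int Int) (cnt : Int → Nat) (L : List Int)
    (hP : L.Pairwise (· > ·)) (hc : ∀ v ∈ L, 1 ≤ cnt v)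
    (hd : ∀ v ∈ L, counts.getD v 0 = (cnt v : Int)) :
    ∀ o res w : Int,
      coloredBallsLoop (pvExpand cnt L ++ [0]) o res (w + 1)
        = cbSweep counts (coloredBallsSentinel L) o w res := by
  induction L with
  | nil =>
      intro o res w
      simp [pvExpand, coloredBallsSentinel, coloredBallsLoop, cbSweep]
  | cons v t ih =>
      intro o res w
      rcases List.pairwise_cons.mp hP with ⟨hv, ht⟩
      obtain ⟨c, hcv⟩ : ∃ c, cnt v = c + 1 :=
        ⟨cnt v - 1, (Nat.succ_pred_eq_of_pos (hc v (by simp))).symm⟩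
      have hk : w + 1 + (c : Int) = w + counts.getD v 0 := by
        rw [hd v (by simp), hcv]; push_cast; ring
      have hexp : pvExpand cnt (v :: t) ++ [0]
          = List.replicate (c + 1) v ++ (pvExpand cnt t ++ [0]) := by
        simp [pvExpand, hcv]
      rw [hexp, pvRunCollapse, hk]
      cases t with
      | nil =>
          simp only [pvExpand, List.flatMap_nil, List.nil_append]
          by_cases hv0 : 0 < v
          · have hs : coloredBallsSentinel [v] = [v, 0] := by
              simp [coloredBallsSentinel, hv0]
            rw [hs, coloredBallsLoop, if_pos hv0, cbSweep]
            split_ifs with h1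
            · simp [coloredBallsLoop, cbSweep]
            · simp only [add_assoc]
          · have hs : coloredBallsSentinel [v] = [v] := by
              simp [coloredBallsSentinel, hv0]
            rw [hs, coloredBallsLoop, if_neg hv0]
            simp [coloredBallsLoop, cbSweep]
      | cons u t' =>
          have hvu : u < v := hv u (by simp)
          obtain ⟨cu, hcu⟩ : ∃ cu, cnt u = cu + 1 :=
            ⟨cnt u - 1, (Nat.succ_pred_eq_of_pos (hc u (by simp))).symm⟩
          have hexp2 : pvExpand cnt (u :: t') ++ [0]
              = u :: (List.replicate cu u ++ (pvExpand cnt t' ++ [0])) := by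
            simp [pvExpand, hcu, List.replicate_succ]
          obtain ⟨z, hz⟩ := pvSentinelCons u t'
          have ihs := ih ht (fun x hx => hc x (by simp [hx])) (fun x hx => hd x (by simp [hx]))
          rw [pvSentinelView, hz]
          rw [hexp2, coloredBallsLoop, if_pos hvu, ← hexp2, cbSweep]
          split_ifs with h1
          · rw [ihs, hz]
          · simp only [add_assoc]

def pvP (bands : List PVBand) (orders : Int) (i : Nat) : Prop :=
  orders ≤ pvCnext (bands.getD i pvB0)

-- A's sweep equals cbLin-then-closed-form over the band table (same orders/units prefix split)
theorem pvSweepLin (counts : PySem.Dict Int Int) :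
    ∀ (levels : List Int) (w units rev orders : Int),
      cbSweep counts levels (orders - units) w rev =
        (match cbLin (cbBuild counts levels w units rev).1 orders with
         | some b => cbCF b orders
         | none => 0) := by
  intro levels
  induction levels with
  | nil => intro w units rev orders; simp [cbSweep, cbBuild, cbLin]
  | cons cur t ih =>
      cases t with
      | nil => intro w units rev orders; simp [cbSweep, cbBuild, cbLin]
      | cons nxt rest =>
          intro w units rev orders
          rw [cbSweep, cbBuild]
          simp only [cbLin, pvCnext]
          by_cases hstop : (w + counts.getD cur 0) * (cur - nxt) < orders - units
          · rw [if_pos hstop, if_neg (by omega)]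
            have := ih (w + counts.getD cur 0)
              (units + (w + counts.getD cur 0) * (cur - nxt))
              (rev + PySem.Int.floordiv ((w + counts.getD cur 0) * (cur + nxt + 1) * (cur - nxt)) 2)
              orders
            rw [show orders - units - (w + counts.getD cur 0) * (cur - nxt)
                = orders - (units + (w + counts.getD cur 0) * (cur - nxt)) by ring] at *
            exact this
          · rw [if_neg hstop, if_pos (by omega)]
            unfold cbCF
            simp only []
            rw [show (w + counts.getD cur 0) *
                  (cur + (cur - PySem.Int.floordiv (orders - units) (w + counts.getD cur 0) + 1)) *
                  PySem.Int.floordiv (orders - units) (w + counts.getD cur 0)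
                = (w + counts.getD cur 0) *
                  (2 * cur - PySem.Int.floordiv (orders - units) (w + counts.getD cur 0) + 1) *
                  PySem.Int.floordiv (orders - units) (w + counts.getD cur 0) by ring,
              ← add_assoc]

-- invariants of the band table: monotone cumulative units, all bounded by the total,
-- the total reached at the last band
theorem pvBuildNilTot (counts : PySem.Dict Int Int) (levels : List Int) (w units rev tot : Int)
    (heq : cbBuild counts levels w units rev = ([], tot)) : tot = units := by
  match levels with
  | [] => cases heq; rfl
  | [x] => cases heq; rfl
  | cur :: nxt :: rest => simp [cbBuild] at heq

theorem pvBuildInv (counts : PySem.Dict Int Int) (hc : ∀ v, 0 ≤ counts.getD v 0) :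
    ∀ (levels : List Int) (w units rev : Int) (bands : List PVBand) (tot : Int),
      cbBuild counts levels w units rev = (bands, tot) → 0 ≤ w →
      levels.Pairwise (fun a b => b ≤ a) →
      ((∀ b ∈ bands, units ≤ pvCnext b) ∧
       (bands.map pvCnext).Pairwise (· ≤ ·) ∧
       (∀ b ∈ bands, pvCnext b ≤ tot) ∧
       units ≤ tot ∧
       ∀ h : bands ≠ [], pvCnext (bands.getLast h) = tot) := by
  intro levels
  induction levels with
  | nil =>
      intro w units rev bands tot heq hw hpw
      cases heq
      simp
  | cons cur t ih =>
      cases t with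
      | nil =>
          intro w units rev bands tot heq hw hpw
          cases heq
          simp
      | cons nxt rest =>
          intro w units rev bands tot heq hw hpw
          rcases List.pairwise_cons.mp hpw with ⟨hcur, hpw'⟩
          have hw' : 0 ≤ w + counts.getD cur 0 := by have := hc cur; omega
          have hdif : 0 ≤ cur - nxt := by have := hcur nxt (by simp); omega
          have hband : 0 ≤ (w + counts.getD cur 0) * (cur - nxt) := mul_nonneg hw' hdif
          rcases hB : cbBuild counts (nxt :: rest) (w + counts.getD cur 0)
              (units + (w + counts.getD cur 0) * (cur - nxt))
              (rev + PySem.Int.floordiv ((w + counts.getD cur 0) * (cur + nxt + 1) * (cur - nxt)) 2)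
            with ⟨tb, tt⟩
          obtain ⟨ih1, ih2, ih3, ih4, ih5⟩ := ih _ _ _ _ _ hB hw' hpw'
          simp only [cbBuild, hB] at heq
          injection heq with h1 h2
          subst h1
          subst h2
          have hcn : pvCnext ⟨cur, nxt, w + counts.getD cur 0, units, rev⟩
              = units + (w + counts.getD cur 0) * (cur - nxt) := rfl
          refine ⟨?_, ?_, ?_, ?_, ?_⟩
          · intro b hb
            rcases List.mem_cons.mp hb with rfl | hb
            · rw [hcn]; omega
            · have := ih1 b hb; omega
          · rw [List.map_cons, List.pairwise_cons]
            refine ⟨?_, ih2⟩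
            intro x hx
            obtain ⟨b, hb, rfl⟩ := List.mem_map.mp hx
            rw [hcn]
            exact ih1 b hb
          · intro b hb
            rcases List.mem_cons.mp hb with rfl | hb
            · rw [hcn]; exact ih4
            · exact ih3 b hb
          · omega
          · intro h
            cases tb with
            | nil =>
                have : tt = units + (w + counts.getD cur 0) * (cur - nxt) :=
                  pvBuildNilTot counts _ _ _ _ _ hB
                simp [List.getLast, hcn, this]
            | cons x xs =>
                rw [List.getLast_cons (by simp)]
                exact ih5 (by simp)

-- P is monotone in the index
theorem pvPmono (bands : List PVBand) (orders : Int)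
    (hpw : (bands.map pvCnext).Pairwise (· ≤ ·)) (i j : Nat) (hij : i ≤ j)
    (hj : j < bands.length) (h : pvP bands orders i) : pvP bands orders j := by
  rcases Nat.eq_or_lt_of_le hij with rfl | hlt
  · exact h
  · have hi : i < bands.length := lt_trans hlt hj
    have := (List.pairwise_iff_getElem.mp hpw) i j (by simpa using hi) (by simpa using hj)
      (by simpa using hlt)
    simp only [List.getElem_map] at this
    unfold pvP at *
    rw [List.getD_eq_getElem bands pvB0 hj]
    rw [List.getD_eq_getElem bands pvB0 hi] at h
    omega

-- the binary search returns the least index satisfying P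
theorem pvSearchSpec (bands : List PVBand) (orders : Int)
    (hpw : (bands.map pvCnext).Pairwise (· ≤ ·)) :
    ∀ (n lo hi : Nat), hi - lo ≤ n → hi < bands.length → lo ≤ hi →
      pvP bands orders hi → (∀ j, j < lo → ¬ pvP bands orders j) →
      (cbSearch bands orders lo hi < bands.length ∧
       pvP bands orders (cbSearch bands orders lo hi) ∧
       ∀ j, j < cbSearch bands orders lo hi → ¬ pvP bands orders j) := by
  intro n
  induction n with
  | zero =>
      intro lo hi hn hhi hlohi hP hmin
      have : lo = hi := by omega
      subst this
      rw [cbSearch, dif_neg (by omega)]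
      exact ⟨hhi, hP, hmin⟩
  | succ n ihn =>
      intro lo hi hn hhi hlohi hP hmin
      by_cases h : lo < hi
      · rw [cbSearch, dif_pos h]
        by_cases hcond : orders ≤ pvCnext (bands.getD ((lo + hi) / 2) pvB0)
        · rw [if_pos hcond]
          exact ihn lo ((lo + hi) / 2) (by omega) (by omega) (by omega) hcond hmin
        · rw [if_neg hcond]
          refine ihn ((lo + hi) / 2 + 1) hi (by omega) hhi (by omega) hP ?_
          intro j hj hPj
          by_cases hjlo : j < lo
          · exact hmin j hjlo hPj
          · exact hcond (pvPmono bands orders hpw j ((lo + hi) / 2) (by omega) (by omega) hPj)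
      · rw [cbSearch, dif_neg h]
        have : lo = hi := by omega
        subst this
        exact ⟨hhi, hP, hmin⟩

-- the linear reference finds exactly the band at the least index satisfying P
theorem pvLinOfLeast (orders : Int) :
    ∀ (bands : List PVBand) (i : Nat), i < bands.length → pvP bands orders i →
      (∀ j, j < i → ¬ pvP bands orders j) →
      cbLin bands orders = some (bands.getD i pvB0) := by
  intro bands
  induction bands with
  | nil => intro i hi; simp at hi
  | cons b t ih =>
      intro i hi hPi hmin
      cases i with
      | zero =>
          unfold pvP at hPi
          simp only [List.getD_cons_zero] at hPi
          simp [cbLin, hPi]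
      | succ i =>
          have h0 : ¬ pvP (b :: t) orders 0 := hmin 0 (Nat.succ_pos _)
          unfold pvP at h0
          simp only [List.getD_cons_zero] at h0
          rw [cbLin, if_neg h0, List.getD_cons_succ]
          refine ih i (by simpa using Nat.lt_of_succ_lt_succ hi) ?_ ?_
          · unfold pvP at hPi ⊢
            simpa [List.getD_cons_succ] using hPi
          · intro j hj hPj
            refine hmin (j + 1) (by omega) ?_
            unfold pvP at hPj ⊢
            simpa [List.getD_cons_succ] using hPj

theorem pvLinNone (orders : Int) :
    ∀ (bands : List PVBand), (∀ b ∈ bands, ¬ orders ≤ pvCnext b) →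
      cbLin bands orders = none := by
  intro bands
  induction bands with
  | nil => intro _; rfl
  | cons b t ih =>
      intro h
      rw [cbLin, if_neg (h b (by simp))]
      exact ih (fun x hx => h x (by simp [hx]))

-- ===== VERDICT (by name: the statement is the Claim_ definition above) =====
theorem coloredBalls_spec : Claim_equal_coloredBalls := by
  intro orders inventory _ _
  show coloredBalls orders inventory = coloredBalls_alt orders inventory
  unfold coloredBalls
  simp only [coloredBalls_alt, PySem.Dict.foldl_insert_getD_add_one_eq_counter,
    PySem.Dict.keys_counter]
  obtain ⟨hP, hN, hm⟩ := pvLevelsProps inventory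
  rw [pvSortedEq]
  rw [show (1 : Int) = 0 + 1 by ring]
  rw [pvMain (PySem.Dict.counter inventory) (fun v => inventory.count v) _ hP
    (fun v hv => List.count_pos_iff.mpr ((hm v).mp hv))
    (fun v _ => by rw [PySem.Dict.getD_counter]) orders 0 0]
  have hsw := pvSweepLin (PySem.Dict.counter inventory)
    (coloredBallsSentinel (PySem.List.sorted (PySem.Set.ofList inventory) (fun x => x) true))
    0 0 0 orders
  rw [sub_zero] at hsw
  rw [hsw]
  have hc : ∀ v, 0 ≤ (PySem.Dict.counter inventory).getD v 0 := fun v => by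
    rw [PySem.Dict.getD_counter]; exact Int.natCast_nonneg _
  have hLv : (coloredBallsSentinel
      (PySem.List.sorted (PySem.Set.ofList inventory) (fun x => x) true)).Pairwise
      (fun a b => b ≤ a) :=
    pvSentinelPairwise _ (PySem.List.sorted_pairwise_rev _ _)
  rcases hB : cbBuild (PySem.Dict.counter inventory)
      (coloredBallsSentinel (PySem.List.sorted (PySem.Set.ofList inventory) (fun x => x) true))
      0 0 0 with ⟨bands, tot⟩
  obtain ⟨i1, i2, i3, i4, i5⟩ := pvBuildInv _ hc _ 0 0 0 bands tot hB le_rfl hLv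
  dsimp only
  by_cases hnil : bands = []
  · subst hnil
    simp [cbLin]
  · by_cases htot : tot < orders
    · rw [pvLinNone orders bands (fun b hb => by have := i3 b hb; omega)]
      simp [htot]
    · have hlen : 0 < bands.length := List.length_pos_iff.mpr hnil
      have hlastP : pvP bands orders (bands.length - 1) := by
        unfold pvP
        rw [List.getD_eq_getElem bands pvB0 (by omega)]
        rw [show bands[bands.length - 1] = bands.getLast hnil from
          (List.getLast_eq_getElem hnil).symm]
        rw [i5 hnil]
        omega
      obtain ⟨s1, s2, s3⟩ := pvSearchSpec bands orders i2 (bands.length - 1) 0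
        (bands.length - 1) (by omega) (by omega) (by omega) hlastP (by omega)
      rw [pvLinOfLeast orders bands _ s1 s2 s3]
      rw [if_neg (by simp [hnil, htot])]
      rfl
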